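-- pv_equiv track=rewrite | github.com/fritz1149/Bishe_2 | preprocess/utils.py | _bigram_generation
-- ===== SOURCE A (Python) =====
-- def _bigram_generation(packet_datagram, packet_len=64):
--     def cut(obj, sec):
--         sec = sec % 4 + sec
--         return [obj[i: i + sec] for i in range(0, len(obj), sec)]
--
--     result = ""
--     generated_datagram = cut(packet_datagram, 1)
--     token_count = 0
--     for sub_string_index in range(len(generated_datagram)):
--         if sub_string_index != (len(generated_datagram) - 1):
--             token_count += 1
--             if token_count > packet_len:
--                 break
--             else:
--                 merge_word_bigram = (
--                     generated_datagram[sub_string_index]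
--                     + generated_datagram[sub_string_index + 1]
--                 )
--         else:
--             break
--         result += merge_word_bigram
--         result += " "
--
--     return result
-- ===== SOURCE B (Python) =====
-- def _bigram_generation(packet_datagram, packet_len=64):
--     n = (len(packet_datagram) + 1) // 2
--     result = ""
--     for i in range(min(n - 1, packet_len)):
--         result += packet_datagram[2 * i:2 * i + 4] + " "
--     return result
-- ===== Notes on version B (the rewrite author's own statement) =====
-- stated objective: simpler
-- what changed: B drops the intermediate 2-char chunk list entirely: it computes the bigram count min(ceil(len/2)-1, packet_len) in closed form and emits each bigram directly as the 4-char slice packet_datagram[2*i:2*i+4], replacing A's chunk-list construction plus index/break loop with token counter (constant-factor speedup: no token-list allocation).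
import Mathlib
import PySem

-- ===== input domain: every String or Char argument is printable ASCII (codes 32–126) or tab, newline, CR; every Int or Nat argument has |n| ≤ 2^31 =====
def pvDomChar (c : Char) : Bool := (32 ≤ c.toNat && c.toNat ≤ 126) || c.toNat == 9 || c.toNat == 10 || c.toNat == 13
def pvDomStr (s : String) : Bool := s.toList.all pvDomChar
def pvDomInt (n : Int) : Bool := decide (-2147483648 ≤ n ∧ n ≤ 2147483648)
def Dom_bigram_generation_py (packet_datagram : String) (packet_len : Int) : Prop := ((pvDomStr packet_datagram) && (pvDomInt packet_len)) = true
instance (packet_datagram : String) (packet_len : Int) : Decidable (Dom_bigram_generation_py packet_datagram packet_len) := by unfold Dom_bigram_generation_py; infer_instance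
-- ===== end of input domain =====

-- B replaces A's intermediate 2-char chunk list and token-counting break loop by a closed-form
-- bigram count and a direct 4-char-slice loop (objective: simpler); return values agree everywhere.

-- ===== PORT A =====
-- the for-loop of A: indices left to process, token_count, accumulated result
def pvALoop (gen : List (List Char)) (packet_len : Int) : List Nat → Int → List Char → List Char
  | [], _, acc => acc
  | i :: rest, token_count, acc =>
      if i ≠ gen.length - 1 then
        if token_count + 1 > packet_len then acc
        else
          pvALoop gen packet_len rest (token_count + 1)
            (acc ++ (gen.getD i [] ++ gen.getD (i + 1) []) ++ [' '])
      else acc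

def bigram_generation_py (packet_datagram : String) (packet_len : Int) : String :=
  let obj := packet_datagram.toList
  let sec : Int := 1 % 4 + 1
  let generated_datagram :=
    (PySem.List.pyRange 0 (PySem.Str.len packet_datagram) sec).map
      (fun i => PySem.List.slice obj (some i) (some (i + sec)))
  String.ofList (pvALoop generated_datagram packet_len (List.range generated_datagram.length) 0 [])

-- ===== PORT B =====
def bigram_generation_py_alt (packet_datagram : String) (packet_len : Int) : String :=
  let cs := packet_datagram.toList
  let n : Int := PySem.Int.floordiv (PySem.Str.len packet_datagram + 1) 2
  String.ofList
    ((PySem.List.pyRange 0 (min (n - 1) packet_len) 1).foldl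
      (fun acc i =>
        acc ++ (PySem.List.slice cs (some (2 * i)) (some (2 * i + 4)) ++ [' '])) [])

-- ===== PRECONDITION & SPEC =====
def Spec_bigram_generation_py (packet_datagram : String) (packet_len : Int) (out : String) : Prop := out = bigram_generation_py_alt packet_datagram packet_len
instance (packet_datagram : String) (packet_len : Int) (out : String) : Decidable (Spec_bigram_generation_py packet_datagram packet_len out) := by unfold Spec_bigram_generation_py; infer_instance

-- ===== CLAIM (what is proved, stated in full; the proofs are below) =====
def Claim_equal_bigram_generation_py : Prop := ∀ (packet_datagram : String) (packet_len : Int), Dom_bigram_generation_py packet_datagram packet_len → Spec_bigram_generation_py packet_datagram packet_len (bigram_generation_py packet_datagram packet_len)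

-- ===== LEMMAS AND PROOFS =====

-- one emitted bigram, as a function of the original character list
def pvBigram (cs : List Char) (j : Nat) : List Char := (cs.drop (2 * j)).take 4 ++ [' ']

lemma pvRange_two (L : Nat) :
    PySem.List.pyRange 0 (L : Int) 2 =
      (List.range ((L + 1) / 2)).map (fun j => ((2 * j : Nat) : Int)) := by
  rw [PySem.List.pyRange_of_pos 0 (L : Int) (by norm_num)]
  have hc : (if (0 : Int) < L then (((L : Int) - 0 + 2 - 1) / 2).toNat else 0) = (L + 1) / 2 := by
    split_ifs with h
    · have : ((L : Int) - 0 + 2 - 1) = ((L + 1 : Nat) : Int) := by push_cast; ring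
      rw [this]
      omega
    · omega
  rw [hc]
  apply List.map_congr_left
  intro j _
  push_cast
  ring

lemma pvGen_getD (cs : List Char) (i : Nat)
    (hi : i < (cs.length + 1) / 2) :
    ((PySem.List.pyRange 0 (cs.length : Int) 2).map
        (fun r => PySem.List.slice cs (some r) (some (r + 2)))).getD i []
      = (cs.drop (2 * i)).take 2 := by
  rw [pvRange_two, List.map_map]
  have hlen : i < ((List.range ((cs.length + 1) / 2)).map
      ((fun r => PySem.List.slice cs (some r) (some (r + 2))) ∘ fun j => ((2 * j : Nat) : Int))).length := by
    simpa using hi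
  rw [List.getD_eq_getElem _ _ hlen]
  simp only [List.getElem_map, List.getElem_range, Function.comp_apply]
  have h4 : ((2 * i : Nat) : Int) + 2 = ((2 * i + 2 : Nat) : Int) := by push_cast; ring
  rw [h4, PySem.List.slice_natCast]
  congr 1
  omega

lemma pvGen_length (cs : List Char) :
    ((PySem.List.pyRange 0 (cs.length : Int) 2).map
        (fun r => PySem.List.slice cs (some r) (some (r + 2)))).length
      = (cs.length + 1) / 2 := by
  rw [pvRange_two]; simp

lemma pvALoop_eq (cs : List Char) (packet_len : Int)
    (gen : List (List Char))
    (hgen : gen = (PySem.List.pyRange 0 (cs.length : Int) 2).map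
        (fun r => PySem.List.slice cs (some r) (some (r + 2))))
    (K : Nat) (hK : (K : Int) = max (min ((((cs.length + 1) / 2 : Nat) : Int) - 1) packet_len) 0) :
    ∀ (m s : Nat) (acc : List Char), m = (cs.length + 1) / 2 - s →
      pvALoop gen packet_len (List.range' s m) (s : Int) acc
        = acc ++ (List.range' s (K - s)).flatMap (pvBigram cs) := by
  have hlen : gen.length = (cs.length + 1) / 2 := by rw [hgen]; exact pvGen_length cs
  intro m
  induction m with
  | zero =>
      intro s acc hm
      have : K - s = 0 := by omega
      simp [pvALoop, this]
  | succ m ih =>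
      intro s acc hm
      set n := (cs.length + 1) / 2 with hn
      have hs : s < n := by omega
      rw [List.range'_succ]
      show pvALoop gen packet_len (s :: List.range' (s+1) m) (s : Int) acc = _
      by_cases hlast : s = gen.length - 1
      · have hKs : K - s = 0 := by rw [hlen] at hlast; omega
        rw [hKs]
        simp [pvALoop, hlast]
      · have hslt : s < n - 1 := by rw [hlen] at hlast; omega
        by_cases hp : (s : Int) + 1 > packet_len
        · have hKs : K - s = 0 := by omega
          simp [pvALoop, hlast, hp, hKs]
        · have hbig : acc ++ (gen.getD s [] ++ gen.getD (s + 1) []) ++ [' ']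
              = acc ++ pvBigram cs s := by
            rw [hgen, pvGen_getD cs s (by omega), pvGen_getD cs (s + 1) (by omega)]
            have h2 : 2 * (s + 1) = 2 * s + 2 := by ring
            rw [pvBigram, h2, ← List.drop_drop]
            have h4 : (4 : Nat) = 2 + 2 := by norm_num
            rw [h4, List.take_add]
            simp
          have hstep : pvALoop gen packet_len (s :: List.range' (s+1) m) (s : Int) acc
              = pvALoop gen packet_len (List.range' (s+1) m) ((s : Int) + 1)
                  (acc ++ (gen.getD s [] ++ gen.getD (s + 1) []) ++ [' ']) := by
            simp [pvALoop, hlast, hp]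
          rw [hstep, hbig]
          have hcast : ((s : Int) + 1) = ((s + 1 : Nat) : Int) := by push_cast; ring
          rw [hcast, ih (s + 1) _ (by omega)]
          have hKgt : s + 1 ≤ K := by omega
          have hsplit : K - s = (K - (s + 1)) + 1 := by omega
          rw [hsplit, List.range'_succ, List.flatMap_cons]
          simp
lemma pvB_eq (cs : List Char) (packet_len : Int)
    (K : Nat) (hK : (K : Int) = max (min ((((cs.length + 1) / 2 : Nat) : Int) - 1) packet_len) 0) :
    ((PySem.List.pyRange 0
        (min (PySem.Int.floordiv ((cs.length : Int) + 1) 2 - 1) packet_len) 1).foldl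
      (fun acc i =>
        acc ++ (PySem.List.slice cs (some (2 * i)) (some (2 * i + 4)) ++ [' '])) [])
      = (List.range K).flatMap (pvBigram cs) := by
  have hfd : PySem.Int.floordiv ((cs.length : Int) + 1) 2
      = (((cs.length + 1) / 2 : Nat) : Int) := by
    show ((cs.length : Int) + 1).fdiv 2 = _
    rw [Int.fdiv_eq_ediv]
    have : ((cs.length : Int) + 1) = ((cs.length + 1 : Nat) : Int) := by push_cast; ring
    rw [this]
    simp
  rw [hfd, PySem.List.foldl_append_eq_flatMap, List.nil_append, PySem.List.pyRange_one,
    List.flatMap_map]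
  have hKt : (min ((((cs.length + 1) / 2 : Nat) : Int) - 1) packet_len - 0).toNat = K := by omega
  rw [hKt]
  apply List.flatMap_congr
  intro j _
  have h1 : 2 * ((0 : Int) + (j : Nat)) = ((2 * j : Nat) : Int) := by push_cast; ring
  have h2 : 2 * ((0 : Int) + (j : Nat)) + 4 = ((2 * j + 4 : Nat) : Int) := by push_cast; ring
  rw [h1]
  rw [show ((2 * j : Nat) : Int) + 4 = ((2 * j + 4 : Nat) : Int) by push_cast; ring]
  rw [PySem.List.slice_natCast]
  unfold pvBigram
  congr 2
  omega

-- ===== VERDICT (by name: the statement is the Claim_ definition above) =====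
theorem bigram_generation_py_spec : Claim_equal_bigram_generation_py := by
  intro s packet_len _
  unfold Spec_bigram_generation_py bigram_generation_py bigram_generation_py_alt
  set cs := s.toList with hcs
  have hone : (1 : Int) % 4 + 1 = 2 := by decide
  set K : Nat := (max (min ((((cs.length + 1) / 2 : Nat) : Int) - 1) packet_len) 0).toNat with hKdef
  have hK : (K : Int) = max (min ((((cs.length + 1) / 2 : Nat) : Int) - 1) packet_len) 0 := by
    rw [hKdef]; omega
  simp only [PySem.Str.len_eq, hone, ← hcs]
  rw [pvGen_length cs]
  congr 1
  rw [pvB_eq cs packet_len K hK]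
  have := pvALoop_eq cs packet_len _ rfl K hK ((cs.length + 1) / 2) 0 [] (by omega)
  simp only [Nat.cast_zero, Nat.sub_zero, List.nil_append, ← List.range_eq_range'] at this
  exact this
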